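-- pv_equiv track=rewrite | github.com/CMU-SAFARI/PaCRAM | Ram_scripts/calc_rh_parameters.py | get_rfm_parameters
-- ===== SOURCE A (Python) =====
-- def get_rfm_parameters(tRH):
--     nrh_rfm_pairs = [
--         (16, 1),
--         (20, 2),
--         (32, 3),
--         (64, 6),
--         (128, 13),
--         (256, 27),
--         (512, 60)
--     ]
--     for nrh, rfmth in nrh_rfm_pairs:
--         if tRH <= nrh:
--             return rfmth
--     return 80
-- ===== SOURCE B (Python) =====
-- import bisect
--
-- _THRESHOLDS = [16, 20, 32, 64, 128, 256, 512]
-- _RESULTS = [1, 2, 3, 6, 13, 27, 60, 80]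
--
-- def get_rfm_parameters(tRH):
--     return _RESULTS[bisect.bisect_left(_THRESHOLDS, tRH)]
-- ===== Notes on version B (the rewrite author's own statement) =====
-- stated objective: idiomatic
-- what changed: Replaced the linear scan over (threshold, value) pairs with a precomputed parallel table indexed by bisect.bisect_left binary search.
import Mathlib
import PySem

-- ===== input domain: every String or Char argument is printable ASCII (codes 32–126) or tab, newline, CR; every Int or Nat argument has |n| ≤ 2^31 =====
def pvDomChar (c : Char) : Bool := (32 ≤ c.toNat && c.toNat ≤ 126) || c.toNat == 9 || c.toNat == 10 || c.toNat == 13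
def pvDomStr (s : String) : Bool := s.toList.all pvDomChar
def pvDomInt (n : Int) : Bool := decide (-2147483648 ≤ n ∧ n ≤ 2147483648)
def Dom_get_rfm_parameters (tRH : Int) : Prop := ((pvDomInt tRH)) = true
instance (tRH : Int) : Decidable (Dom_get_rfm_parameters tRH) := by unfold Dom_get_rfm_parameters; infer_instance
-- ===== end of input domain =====

-- B replaces A's linear scan of (threshold, value) pairs with a binary-search
-- (bisect_left) index into two parallel constant tables; objective: idiomatic.

-- ===== PORT A =====
-- A's for-loop over the pair list with early return; [] falls through to 80.
def rfmLoop (tRH : Int) : List (Int × Int) → Int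
  | [] => 80
  | (nrh, rfmth) :: rest => if tRH ≤ nrh then rfmth else rfmLoop tRH rest

def get_rfm_parameters (tRH : Int) : Int :=
  rfmLoop tRH [(16, 1), (20, 2), (32, 3), (64, 6), (128, 13), (256, 27), (512, 60)]

-- ===== PORT B =====
-- Port of Python's bisect.bisect_left on a list of Ints (the stdlib call Source B makes).
def bisectLeft (a : List Int) (x : Int) (lo hi : Nat) : Nat :=
  if _h : lo < hi then
    let mid := (lo + hi) / 2
    if a.getD mid 0 < x then bisectLeft a x (mid + 1) hi else bisectLeft a x lo mid
  else lo
termination_by hi - lo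
decreasing_by all_goals omega

def rfmThresholds : List Int := [16, 20, 32, 64, 128, 256, 512]
def rfmResults : List Int := [1, 2, 3, 6, 13, 27, 60, 80]

def get_rfm_parameters_alt (tRH : Int) : Int :=
  rfmResults.getD (bisectLeft rfmThresholds tRH 0 rfmThresholds.length) 0

-- ===== PRECONDITION & SPEC =====
def Spec_get_rfm_parameters (tRH : Int) (out : Int) : Prop := out = get_rfm_parameters_alt tRH
instance (tRH : Int) (out : Int) : Decidable (Spec_get_rfm_parameters tRH out) := by unfold Spec_get_rfm_parameters; infer_instance

-- ===== CLAIM (what is proved, stated in full; the proofs are below) =====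
def Claim_equal_get_rfm_parameters : Prop := ∀ (tRH : Int), Dom_get_rfm_parameters tRH → Spec_get_rfm_parameters tRH (get_rfm_parameters tRH)

-- ===== LEMMAS AND PROOFS =====
theorem alt_piecewise (t : Int) :
    get_rfm_parameters_alt t =
      if t ≤ 16 then 1 else if t ≤ 20 then 2 else if t ≤ 32 then 3 else
      if t ≤ 64 then 6 else if t ≤ 128 then 13 else if t ≤ 256 then 27 else
      if t ≤ 512 then 60 else 80 := by
  unfold get_rfm_parameters_alt
  rw [bisectLeft]
  norm_num [rfmThresholds]
  split_ifs with h1 <;>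
    (rw [bisectLeft]; norm_num) <;>
    split_ifs with h2 <;>
    (rw [bisectLeft]; norm_num) <;>
    split_ifs with h3 <;>
    (rw [bisectLeft]; norm_num [rfmResults]) <;> omega

-- ===== VERDICT (by name: the statement is the Claim_ definition above) =====
theorem get_rfm_parameters_spec : Claim_equal_get_rfm_parameters := by
  intro t _
  unfold Spec_get_rfm_parameters get_rfm_parameters rfmLoop
  rw [alt_piecewise]
  split_ifs <;> simp_all [rfmLoop] <;> omega
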